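-- pv_equiv track=rewrite | github.com/jpfxgood/my_radio | my_radio_module.py | nopunct
-- ===== SOURCE A (Python) =====
-- def nopunct( name ):
--     """ remove the punctuation from a string """
--     retname = ""
--     inSpace = False
--     for c in name:
--         if c.isspace():
--             if inSpace:
--                 continue
--             inSpace = True
--             retname = retname + " "
--         elif c.isalnum() or c in [".",",","!","/",":","-","'","%"]:
--             inSpace = False
--             retname = retname + c
--     return retname
-- ===== SOURCE B (Python) =====
-- def nopunct(name):
--     """ remove the punctuation from a string """
--     keep = [".", ",", "!", "/", ":", "-", "'", "%"]
--     # pass 1: map spaces to ' ', keep allowed chars, drop everything else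
--     t = "".join(" " if c.isspace() else c for c in name if c.isspace() or c.isalnum() or c in keep)
--     # pass 2: collapse runs of spaces
--     out = []
--     prev = None
--     for ch in t:
--         if ch != " " or prev != " ":
--             out.append(ch)
--         prev = ch
--     return "".join(out)
-- ===== Notes on version B (the rewrite author's own statement) =====
-- stated objective: alternative
-- what changed: Replaces A's single stateful loop (inSpace flag deciding per character) by two independent passes: a filter+map that classifies each character (space -> ' ', kept char -> itself, other -> dropped), followed by a separate loop that collapses runs of spaces using only the previous emitted character.
import Mathlib
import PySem

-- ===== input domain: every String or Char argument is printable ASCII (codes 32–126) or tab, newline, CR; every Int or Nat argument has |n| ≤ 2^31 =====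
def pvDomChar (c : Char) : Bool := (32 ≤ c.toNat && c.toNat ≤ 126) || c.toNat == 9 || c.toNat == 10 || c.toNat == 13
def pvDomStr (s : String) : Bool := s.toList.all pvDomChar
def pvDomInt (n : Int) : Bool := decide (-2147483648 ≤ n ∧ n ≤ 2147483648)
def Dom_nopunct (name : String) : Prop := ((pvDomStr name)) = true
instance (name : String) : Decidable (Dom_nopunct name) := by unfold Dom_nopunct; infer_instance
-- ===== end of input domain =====

-- B replaces A's single stateful loop by two passes (classify each char, then collapse space runs); objective: alternative decomposition, same cost.

-- ===== PORT A =====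
-- the for-loop of A, state = (ret, inSpace)
def nopunctGo : List Char → List Char → Bool → List Char
  | [], ret, _ => ret
  | c :: cs, ret, inSpace =>
    if PySem.Chars.isspace c then
      if inSpace then nopunctGo cs ret inSpace
      else nopunctGo cs (ret ++ [' ']) true
    else if PySem.Chars.isalnum c || [ '.', ',', '!', '/', ':', '-', '\'', '%'].contains c then
      nopunctGo cs (ret ++ [c]) false
    else nopunctGo cs ret inSpace

def nopunct (name : String) : String := String.mk (nopunctGo name.toList [] false)

-- ===== PORT B =====
-- pass 1 of Source B: filter to spaces/kept chars, map spaces to ' '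
def nopunctPass1 (cs : List Char) : List Char :=
  (cs.filter (fun c => PySem.Chars.isspace c || PySem.Chars.isalnum c ||
      [ '.', ',', '!', '/', ':', '-', '\'', '%'].contains c)).map
    (fun c => if PySem.Chars.isspace c then ' ' else c)

-- pass 2 of Source B: the collapse loop, state = (out, prev)
def nopunctCollapse : List Char → List Char → Option Char → List Char
  | [], out, _ => out
  | ch :: cs, out, prev =>
      nopunctCollapse cs (if ch != ' ' || prev != some ' ' then out ++ [ch] else out) (some ch)

def nopunct_alt (name : String) : String :=
  String.mk (nopunctCollapse (nopunctPass1 name.toList) [] none)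

-- ===== PRECONDITION & SPEC =====
def Spec_nopunct (name : String) (out : String) : Prop := out = nopunct_alt name
instance (name : String) (out : String) : Decidable (Spec_nopunct name out) := by unfold Spec_nopunct; infer_instance

-- ===== CLAIM (what is proved, stated in full; the proofs are below) =====
def Claim_equal_nopunct : Prop := ∀ (name : String), Dom_nopunct name → Spec_nopunct name (nopunct name)

-- ===== LEMMAS AND PROOFS =====

theorem not_space_ne_space {c : Char} (h : ¬ PySem.Chars.isspace c = true) : c ≠ ' ' := by
  intro hc; subst hc; exact h (by decide)

-- loop invariant: A's loop equals B's collapse applied to the remaining classified chars,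
-- provided prev-is-space matches inSpace
theorem nopunct_main (cs : List Char) (ret : List Char) (b : Bool) (p : Option Char)
    (h : (p = some ' ') ↔ (b = true)) :
    nopunctGo cs ret b = nopunctCollapse (nopunctPass1 cs) ret p := by
  induction cs generalizing ret b p with
  | nil => simp [nopunctGo, nopunctPass1, nopunctCollapse]
  | cons c cs ih =>
    by_cases hs : PySem.Chars.isspace c = true
    · have h1 : nopunctPass1 (c :: cs) = ' ' :: nopunctPass1 cs := by
        simp [nopunctPass1, hs]
      rw [h1]
      cases b with
      | true =>
        have hp : p = some ' ' := h.mpr rfl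
        simp only [nopunctGo, hs, if_true, if_pos rfl]
        rw [ih ret true (some ' ') (by simp)]
        simp [nopunctCollapse, hp]
      | false =>
        have hp : ¬ p = some ' ' := fun hh => by simpa using h.mp hh
        simp only [nopunctGo, hs, if_true]
        rw [if_neg (by simp), ih (ret ++ [' ']) true (some ' ') (by simp)]
        simp [nopunctCollapse, hp]
    · by_cases hk : (PySem.Chars.isalnum c || [ '.', ',', '!', '/', ':', '-', '\'', '%'].contains c) = true
      · have h1 : nopunctPass1 (c :: cs) = c :: nopunctPass1 cs := by
          simp only [nopunctPass1, List.filter_cons]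
          rw [if_pos (by simp [hs, hk] at hk ⊢ <;> tauto)]
          simp [hs]
        have hc : c ≠ ' ' := not_space_ne_space hs
        rw [h1]
        simp only [nopunctGo, hs, if_false, hk, if_true]
        rw [ih (ret ++ [c]) false (some c) (by simp [hc])]
        simp [nopunctCollapse, hc]
      · have h1 : nopunctPass1 (c :: cs) = nopunctPass1 cs := by
          simp only [nopunctPass1, List.filter_cons]
          rw [if_neg (by simp [hs] at hk ⊢; tauto)]
        rw [h1]
        simp only [nopunctGo, hs, if_false, hk]
        exact ih ret b p h

-- ===== VERDICT (by name: the statement is the Claim_ definition above) =====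
theorem nopunct_spec : Claim_equal_nopunct := by
  intro name _
  unfold Spec_nopunct nopunct nopunct_alt
  rw [nopunct_main name.toList [] false none (by simp)]
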